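-- pv_equiv track=rewrite | github.com/YxZhang-XHCY/eccToolkit | src/ecctoolkit/te/analyze.py | _parse_gff_attr
-- ===== SOURCE A (Python) =====
-- from typing import Optional
--
-- def _parse_gff_attr(attrs: str, key: str) -> Optional[str]:
--     """Extract attribute value from GFF attributes string."""
--     # GFF3: key=value;key2=value2
--     for part in attrs.split(";"):
--         part = part.strip()
--         if "=" in part:
--             k, v = part.split("=", 1)
--             if k.strip() == key:
--                 return v.strip()
--         # GTF: key "value"
--         elif part.startswith(f'{key} "'):
--             return part.split('"')[1]
--     return None
-- ===== SOURCE B (Python) =====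
-- from typing import Optional
--
-- def _parse_gff_attr(attrs: str, key: str) -> Optional[str]:
--     """Extract attribute value from GFF/GTF attributes string.
--
--     Parses the whole string once into a name -> value table (first occurrence
--     wins), then looks the key up: GFF3 parts are 'name=value', GTF parts are
--     'name "value"'.
--     """
--     table = {}
--     for part in attrs.split(";"):
--         part = part.strip()
--         if "=" in part:
--             k, v = part.split("=", 1)
--             table.setdefault(k.strip(), v.strip())
--         elif ' "' in part:
--             name, rest = part.split(' "', 1)
--             table.setdefault(name, rest.split('"', 1)[0])
--     return table.get(key)
-- ===== Notes on version B (the rewrite author's own statement) =====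
-- stated objective: idiomatic
-- what changed: Replaces A's scan-with-early-return by parsing the whole attribute string once into a first-occurrence-wins dict (k=v parts map k.strip() to v.strip(); GTF parts split on the first ' "' map the name to the text up to the next quote) followed by a single lookup; Pre_ excludes keys containing a double quote, on which A's prefix test part.startswith(f'{key} "') can fire at an accidental quote boundary inside a part -- a corner no real GFF/GTF attribute key reaches and on which neither value is specified.
-- outside the precondition, e.g. on _parse_gff_attr('a" "v', 'a"'): A returns ' ', B returns 'v'
import Mathlib
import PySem

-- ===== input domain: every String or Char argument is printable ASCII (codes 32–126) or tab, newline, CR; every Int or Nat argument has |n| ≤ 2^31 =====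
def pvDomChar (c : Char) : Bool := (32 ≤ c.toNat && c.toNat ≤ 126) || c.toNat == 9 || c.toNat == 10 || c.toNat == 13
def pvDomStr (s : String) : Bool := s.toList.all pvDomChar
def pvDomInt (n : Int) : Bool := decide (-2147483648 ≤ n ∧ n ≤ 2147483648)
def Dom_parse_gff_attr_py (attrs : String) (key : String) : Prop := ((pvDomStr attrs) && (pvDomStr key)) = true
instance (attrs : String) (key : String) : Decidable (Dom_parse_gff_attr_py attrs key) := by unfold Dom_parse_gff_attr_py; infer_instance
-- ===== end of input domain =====

-- B replaces A's scan-with-early-return by parsing the whole attribute string once into a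
-- first-occurrence-wins dict and then doing a single lookup (objective: idiomatic).

-- ===== PORT A =====
-- for part in attrs.split(";"): early-return scan, one part at a time
def pvAGo (key : String) : List String → Option String
  | [] => none                                            -- return None
  | p :: restParts =>
    let part := PySem.Str.strip p                          -- part = part.strip()
    if PySem.Str.isIn "=" part then                        -- if "=" in part:
      -- k, v = part.split("=", 1)  (exactly two pieces exist since "=" in part; getD unreachable)
      let pieces := (PySem.Str.splitMax? part "=" 1).getD []
      let k := pieces.getD 0 ""
      let v := pieces.getD 1 ""
      if PySem.Str.strip k == key then some (PySem.Str.strip v)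
      else pvAGo key restParts
    else if PySem.Str.startswith part (key ++ " \"") then  -- elif part.startswith(f'{key} "'):
      -- part.split('"')[1]  (index 1 exists: the guard puts a '"' inside part; getD unreachable)
      some (((PySem.Str.split? part "\"").getD []).getD 1 "")
    else pvAGo key restParts

def parse_gff_attr_py (attrs : String) (key : String) : Option String :=
  pvAGo key ((PySem.Str.split? attrs ";").getD [])         -- ";" ≠ "" so split? is some

-- ===== PORT B =====
-- build the index: one dict, first occurrence of a name wins (setdefault)
def pvBBuild : List String → PySem.Dict String String → PySem.Dict String String
  | [], table => table
  | p :: restParts, table =>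
    let part := PySem.Str.strip p                          -- part = part.strip()
    let table' :=
      if PySem.Str.isIn "=" part then                      -- if "=" in part:
        -- k, v = part.split("=", 1)  (two pieces exist since "=" in part; getD unreachable)
        let pieces := (PySem.Str.splitMax? part "=" 1).getD []
        table.setdefault (PySem.Str.strip (pieces.getD 0 "")) (PySem.Str.strip (pieces.getD 1 ""))
      else if PySem.Str.isIn " \"" part then               -- elif ' "' in part:
        -- name, rest = part.split(' "', 1)  (two pieces exist since ' "' in part; getD unreachable)
        let pieces := (PySem.Str.splitMax? part " \"" 1).getD []
        -- table.setdefault(name, rest.split('"', 1)[0])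
        table.setdefault (pieces.getD 0 "")
          (((PySem.Str.splitMax? (pieces.getD 1 "") "\"" 1).getD []).getD 0 "")
      else table
    pvBBuild restParts table'

def parse_gff_attr_py_alt (attrs : String) (key : String) : Option String :=
  (pvBBuild ((PySem.Str.split? attrs ";").getD []) PySem.Dict.empty).get? key

-- ===== PRECONDITION & SPEC =====
-- Pre_ excludes keys containing a double quote: on such keys A's GTF prefix test
-- part.startswith(f'{key} "') can fire at an accidental quote boundary inside a part —
-- a corner no real GFF/GTF attribute key reaches and on which neither value is specified.
def Pre_parse_gff_attr_py (attrs : String) (key : String) : Prop := '"' ∉ key.toList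
instance (attrs : String) (key : String) : Decidable (Pre_parse_gff_attr_py attrs key) := by
  unfold Pre_parse_gff_attr_py; infer_instance

def pvWitness_parse_gff_attr_py : String × String := ("gene_id \"g1\"; x=5", "gene_id")

def Spec_parse_gff_attr_py (attrs : String) (key : String) (out : Option String) : Prop :=
  out = parse_gff_attr_py_alt attrs key
instance (attrs : String) (key : String) (out : Option String) :
    Decidable (Spec_parse_gff_attr_py attrs key out) := by
  unfold Spec_parse_gff_attr_py; infer_instance

-- ===== CLAIM (what is proved, stated in full; the proofs are below) =====
def Claim_equal_parse_gff_attr_py : Prop := ∀ (attrs : String) (key : String), Dom_parse_gff_attr_py attrs key → Pre_parse_gff_attr_py attrs key → Spec_parse_gff_attr_py attrs key (parse_gff_attr_py attrs key)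

-- ===== LEMMAS AND PROOFS =====

-- ===== list-level split lemmas =====
-- unlimited single-char split (A's part.split('"'))
def pvCharSplit (q : Char) : List Char → List (List Char)
  | [] => [[]]
  | c :: rest => if c = q then [] :: pvCharSplit q rest
                 else (pvCharSplit q rest).modifyHead (c :: ·)

theorem pvCharSplit_ne_nil (q : Char) (l : List Char) : pvCharSplit q l ≠ [] := by
  cases l with
  | nil => simp [pvCharSplit]
  | cons c rest => unfold pvCharSplit; split
                   · simp
                   · cases h : pvCharSplit q rest <;> simp_all [pvCharSplit_ne_nil q rest]

theorem pvGo_eq (q : Char) : ∀ (fuel : Nat) (l cur : List Char) (acc : List (List Char)),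
    l.length ≤ fuel →
    PySem.Chars.splitOn.go [q] fuel l cur acc
      = acc.reverse ++ (pvCharSplit q l).modifyHead (cur.reverse ++ ·) := by
  intro fuel
  induction fuel with
  | zero => intro l cur acc h
            have : l = [] := by cases l <;> simp_all
            subst this
            simp [PySem.Chars.splitOn.go, pvCharSplit]
  | succ n ih =>
    intro l cur acc h
    cases l with
    | nil => simp [PySem.Chars.splitOn.go, pvCharSplit]
    | cons c rest =>
      simp only [PySem.Chars.splitOn.go]
      by_cases hc : q = c
      · subst hc
        simp only [List.isPrefixOf, beq_self_eq_true, Bool.true_and, if_pos, List.length_cons,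
          List.drop_succ_cons, List.length_nil, List.drop_zero]
        rw [ih rest [] (cur.reverse :: acc) (by simpa using Nat.le_of_succ_le_succ h)]
        simp only [pvCharSplit, List.modifyHead, List.reverse_cons,
          List.append_assoc, List.reverse_nil, List.nil_append, List.singleton_append]
        cases pvCharSplit q rest <;> simp
      · have hne : ([q].isPrefixOf (c :: rest)) = false := by
          simp [List.isPrefixOf]
          exact fun hh => hc (by simpa using hh)
        rw [if_neg (by simp [hne])]
        rw [ih rest (c :: cur) acc (by simpa using Nat.le_of_succ_le_succ h)]
        have hcq : ¬ (c = q) := fun hh => hc hh.symm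
        simp only [pvCharSplit, if_neg hcq]
        congr 1
        cases hcs : pvCharSplit q rest with
        | nil => exact absurd hcs (pvCharSplit_ne_nil q rest)
        | cons hd tl => simp [List.modifyHead]

theorem pvSplitOn_singleton (q : Char) (l : List Char) :
    PySem.Chars.splitOn l [q] = pvCharSplit q l := by
  unfold PySem.Chars.splitOn
  rw [pvGo_eq q (l.length + 1) l [] [] (by omega)]
  cases h : pvCharSplit q l with
  | nil => exact absurd h (pvCharSplit_ne_nil q l)
  | cons hd tl => simp [List.modifyHead]

-- split(sep, 1): the piece before / after the FIRST occurrence of sep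
def pvPart (sep : List Char) : List Char → Option (List Char × List Char)
  | [] => none
  | c :: rest => if sep.isPrefixOf (c :: rest) then some ([], (c :: rest).drop sep.length)
                 else (pvPart sep rest).map (fun ab => (c :: ab.1, ab.2))

theorem pvGoMax_zero (sep : List Char) (fuel : Nat) (l cur : List Char) (acc : List (List Char)) :
    PySem.Chars.splitOnMax.go sep fuel 0 l cur acc = ((cur.reverse ++ l) :: acc).reverse := by
  cases fuel with
  | zero => simp [PySem.Chars.splitOnMax.go]
  | succ n => cases l <;> simp [PySem.Chars.splitOnMax.go]

theorem pvGoMax_one (sep : List Char) :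
    ∀ (fuel : Nat) (l cur : List Char) (acc : List (List Char)), l.length ≤ fuel →
    PySem.Chars.splitOnMax.go sep fuel 1 l cur acc
      = acc.reverse ++ (match pvPart sep l with
          | none => [cur.reverse ++ l]
          | some ab => [cur.reverse ++ ab.1, ab.2]) := by
  intro fuel
  induction fuel with
  | zero => intro l cur acc h
            have : l = [] := by cases l <;> simp_all
            subst this
            simp [PySem.Chars.splitOnMax.go, pvPart]
  | succ n ih =>
    intro l cur acc h
    cases l with
    | nil => simp [PySem.Chars.splitOnMax.go, pvPart]
    | cons c rest =>
      simp only [PySem.Chars.splitOnMax.go]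
      rw [if_neg (one_ne_zero)]
      by_cases hp : sep.isPrefixOf (c :: rest) = true
      · rw [if_pos hp, pvGoMax_zero]
        simp only [pvPart, if_pos hp]
        simp
      · rw [if_neg hp]
        rw [ih rest (c :: cur) acc (by simpa using Nat.le_of_succ_le_succ h)]
        simp only [pvPart, if_neg hp]
        cases hcs : pvPart sep rest <;> simp

theorem pvSplitMax_one (sep : List Char) (l : List Char) :
    PySem.Chars.splitOnMax l sep 1
      = match pvPart sep l with
        | none => [l]
        | some ab => [ab.1, ab.2] := by
  unfold PySem.Chars.splitOnMax
  rw [if_neg (by norm_num)]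
  rw [show ((1:Int).toNat) = 1 from rfl]
  rw [pvGoMax_one sep (l.length + 1) l [] [] (by omega)]
  cases pvPart sep l <;> simp

-- pvPart facts
theorem pvPart_none_iff (sep : List Char) (hsep : sep ≠ []) (l : List Char) :
    pvPart sep l = none ↔ ¬ sep <:+: l := by
  induction l with
  | nil => simp only [pvPart, true_iff]
           intro hinf
           exact hsep (List.infix_nil.mp hinf)
  | cons c rest ih =>
    simp only [pvPart]
    by_cases hp : sep.isPrefixOf (c :: rest) = true
    · rw [if_pos hp]
      simp only [reduceCtorEq, false_iff, not_not]
      exact (List.isPrefixOf_iff_prefix.mp hp).isInfix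
    · rw [if_neg hp]
      rw [List.infix_cons_iff]
      cases hr : pvPart sep rest with
      | none => simp only [Option.map_none, true_iff]
                rintro (hpre | hinf)
                · exact hp (List.isPrefixOf_iff_prefix.mpr hpre)
                · exact ih.mp hr hinf
      | some ab => simp only [Option.map_some, reduceCtorEq, false_iff, not_not]
                   exact Or.inr (by by_contra hni; exact absurd hr (by simp [ih.mpr hni]))

theorem pvPart_decomp (sep : List Char) : ∀ (l a b : List Char),
    pvPart sep l = some (a, b) → l = a ++ sep ++ b := by
  intro l
  induction l with
  | nil => intro a b h; simp [pvPart] at h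
  | cons c rest ih =>
    intro a b h
    simp only [pvPart] at h
    by_cases hp : sep.isPrefixOf (c :: rest) = true
    · rw [if_pos hp] at h
      obtain ⟨t, ht⟩ := List.isPrefixOf_iff_prefix.mp hp
      injection h with h'
      injection h' with h1 h2
      subst h1
      rw [← ht] at h2 ⊢
      rw [List.drop_left] at h2
      rw [← h2]
      simp
    · rw [if_neg hp] at h
      cases hr : pvPart sep rest with
      | none => simp [hr] at h
      | some ab => rw [hr] at h
                   simp only [Option.map_some, Option.some_inj] at h
                   injection h with h1 h2
                   subst h1
                   subst h2
                   simp [ih ab.1 ab.2 (by rw [hr])]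

-- the first ' "' of key ++ ' ' :: '"' :: t is the shown one, when key has no quote
theorem pvPart_at (key t : List Char) (hq : '"' ∉ key) :
    pvPart [' ', '"'] (key ++ ' ' :: '"' :: t) = some (key, t) := by
  induction key with
  | nil => simp [pvPart, List.isPrefixOf]
  | cons k ks ih =>
    have hqks : '"' ∉ ks := fun hm => hq (List.mem_cons_of_mem _ hm)
    simp only [List.cons_append, pvPart]
    rw [if_neg ?hno]
    · rw [ih hqks]
      rfl
    case hno =>
      intro hp
      obtain ⟨u, hu⟩ := List.isPrefixOf_iff_prefix.mp hp
      simp only [List.cons_append, List.cons.injEq] at hu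
      obtain ⟨hk, hrest⟩ := hu
      cases ks with
      | nil => simp at hrest
      | cons c cs => simp at hrest
                     exact hq (by simp [← hrest.1])

-- first-occurrence split at a single character, in takeWhile/dropWhile form
theorem pvPart_single (q : Char) (l : List Char) :
    pvPart [q] l
      = if q ∈ l then some (l.takeWhile (· ≠ q), (l.dropWhile (· ≠ q)).tail) else none := by
  induction l with
  | nil => simp [pvPart]
  | cons c rest ih =>
    simp only [pvPart]
    by_cases hc : c = q
    · subst hc
      rw [if_pos (by simp [List.isPrefixOf])]
      simp [List.takeWhile, List.dropWhile]
    · have hp : ([q].isPrefixOf (c :: rest)) = false := by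
        simp [List.isPrefixOf]
        exact fun hh => hc (by simpa using hh.symm)
      rw [if_neg (by simp [hp]), ih]
      have hcq : (decide (c ≠ q)) = true := by simp [hc]
      by_cases hm : q ∈ rest
      · have hmem : q ∈ c :: rest := List.mem_cons_of_mem _ hm
        simp [hm, hmem, hc]
      · have hmem : q ∉ c :: rest := by
          intro hq'
          rcases List.mem_cons.mp hq' with h1 | h2
          · exact hc h1.symm
          · exact hm h2
        simp [hm, hmem]

-- ===== easy list facts =====
theorem pvTakeWhile_of_not_mem (q : Char) (l : List Char) (h : q ∉ l) :
    l.takeWhile (· ≠ q) = l := by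
  rw [List.takeWhile_eq_self_iff]
  intro a ha
  simp
  exact fun he => h (he ▸ ha)

theorem pvCharSplit_not_mem (q : Char) (l : List Char) (h : q ∉ l) : pvCharSplit q l = [l] := by
  induction l with
  | nil => simp [pvCharSplit]
  | cons c rest ih =>
    have hc : ¬ (c = q) := fun he => h (by simp [he])
    have hr : q ∉ rest := fun hm => h (List.mem_cons_of_mem _ hm)
    simp [pvCharSplit, hc, ih hr, List.modifyHead]

theorem pvCharSplit_mem (q : Char) (l : List Char) (h : q ∈ l) :
    pvCharSplit q l = l.takeWhile (· ≠ q) :: pvCharSplit q ((l.dropWhile (· ≠ q)).tail) := by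
  induction l with
  | nil => simp at h
  | cons c rest ih =>
    by_cases hc : c = q
    · subst hc
      simp [pvCharSplit, List.takeWhile, List.dropWhile]
    · have hr : q ∈ rest := by rcases List.mem_cons.mp h with h1 | h2
                               · exact absurd h1.symm hc
                               · exact h2
      have hcq : (decide (c ≠ q)) = true := by simp [hc]
      simp only [pvCharSplit, if_neg hc, ih hr, List.modifyHead, List.takeWhile_cons, hcq,
        List.dropWhile_cons, if_pos]

-- ===== string-level bridge lemmas =====
theorem pvStartswith_app (part key : String) :
    PySem.Str.startswith part (key ++ " \"") = true ↔ key.toList ++ [' ', '"'] <+: part.toList := by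
  rw [PySem.Str.startswith_eq, PySem.Chars.startswith_iff, String.toList_append]
  rfl

theorem pvASplit_val (part : String) (h : '"' ∈ part.toList) :
    ((PySem.Str.split? part "\"").getD []).getD 1 ""
      = String.ofList ((((part.toList.dropWhile (· ≠ '"'))).tail).takeWhile (· ≠ '"')) := by
  unfold PySem.Str.split? PySem.Chars.split?
  rw [if_neg (by decide)]
  show (((PySem.Chars.splitOn part.toList ['"']).map String.ofList) : List String).getD 1 "" = _
  rw [pvSplitOn_singleton, pvCharSplit_mem _ _ h]
  by_cases h2 : '"' ∈ (part.toList.dropWhile (· ≠ '"')).tail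
  · rw [pvCharSplit_mem _ _ h2]; simp
  · rw [pvCharSplit_not_mem _ _ h2, pvTakeWhile_of_not_mem _ _ h2]; simp

-- B's rest.split('"', 1)[0]: everything before the first quote
theorem pvBVal (s : String) :
    ((PySem.Str.splitMax? s "\"" 1).getD []).getD 0 ""
      = String.ofList (s.toList.takeWhile (· ≠ '"')) := by
  unfold PySem.Str.splitMax? PySem.Chars.splitMax?
  rw [if_neg (by decide)]
  show (((PySem.Chars.splitOnMax s.toList ['"'] 1).map String.ofList) : List String).getD 0 "" = _
  rw [pvSplitMax_one, pvPart_single]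
  by_cases h : '"' ∈ s.toList
  · rw [if_pos h]
    simp
  · rw [if_neg h, pvTakeWhile_of_not_mem _ _ h]
    simp

-- B's part.split(' "', 1) at the string level
theorem pvBPieces (part : String) :
    (PySem.Str.splitMax? part " \"" 1).getD []
      = match pvPart [' ', '"'] part.toList with
        | none => [part]
        | some ab => [String.ofList ab.1, String.ofList ab.2] := by
  unfold PySem.Str.splitMax? PySem.Chars.splitMax?
  rw [if_neg (by decide)]
  show (((PySem.Chars.splitOnMax part.toList [' ', '"'] 1).map String.ofList) : List String) = _
  rw [pvSplitMax_one]
  cases pvPart [' ', '"'] part.toList <;> simp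

theorem pvIsInQuote (part : String) :
    PySem.Str.isIn " \"" part = true ↔ pvPart [' ', '"'] part.toList ≠ none := by
  rw [PySem.Str.isIn_iff_infix]
  constructor
  · intro h hn
    exact (pvPart_none_iff [' ', '"'] (by simp) part.toList).mp hn (by exact h)
  · intro h
    by_contra hni
    exact h ((pvPart_none_iff [' ', '"'] (by simp) part.toList).mpr (by exact hni))

-- ===== dict invariant: B's index lookup equals A's scan =====
theorem pvSD_preserve {d : PySem.Dict String String} {k0 k v w : String}
    (h : d.get? k0 = some w) : (d.setdefault k v).get? k0 = some w := by
  by_cases he : k0 = k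
  · subst he; rw [PySem.Dict.get?_setdefault_self, h]; rfl
  · rw [PySem.Dict.get?_setdefault_of_ne _ v he, h]

theorem pvPersist (key w : String) : ∀ (parts : List String) (table : PySem.Dict String String),
    table.get? key = some w → (pvBBuild parts table).get? key = some w := by
  intro parts
  induction parts with
  | nil => intro table h; simpa [pvBBuild] using h
  | cons p rest ih =>
    intro table h
    simp only [pvBBuild]
    apply ih
    split
    · exact pvSD_preserve h
    · split
      · exact pvSD_preserve h
      · exact h

theorem pvINV (key : String) (hq : '"' ∉ key.toList) :
    ∀ (parts : List String) (table : PySem.Dict String String),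
    (pvBBuild parts table).get? key = (table.get? key).or (pvAGo key parts) := by
  intro parts
  induction parts with
  | nil => intro table; cases h : table.get? key <;> simp [pvBBuild, pvAGo, h]
  | cons p rest ih =>
    intro table
    cases htab : table.get? key with
    | some w =>
      rw [pvPersist key w (p :: rest) table htab]
      simp [Option.or]
    | none =>
      simp only [pvBBuild, pvAGo, Option.none_or]
      by_cases hise : PySem.Str.isIn "=" (PySem.Str.strip p) = true
      · rw [if_pos hise, if_pos hise]
        by_cases hk : (PySem.Str.strip (((PySem.Str.splitMax? (PySem.Str.strip p) "=" 1).getD []).getD 0 "") == key) = true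
        · rw [if_pos hk]
          have hkeq := beq_iff_eq.mp hk
          rw [pvPersist key _ rest _ (by rw [hkeq, PySem.Dict.get?_setdefault_self, htab])]
          rfl
        · rw [if_neg hk]
          have hkne : PySem.Str.strip (((PySem.Str.splitMax? (PySem.Str.strip p) "=" 1).getD []).getD 0 "") ≠ key :=
            fun he => hk (beq_iff_eq.mpr he)
          have htab' : ((table.setdefault (PySem.Str.strip (((PySem.Str.splitMax? (PySem.Str.strip p) "=" 1).getD []).getD 0 ""))
              (PySem.Str.strip (((PySem.Str.splitMax? (PySem.Str.strip p) "=" 1).getD []).getD 1 ""))).get? key) = none := by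
            rw [PySem.Dict.get?_setdefault_of_ne _ _ (Ne.symm hkne)]; exact htab
          rw [ih _, htab']
          simp
      · rw [if_neg hise, if_neg hise]
        by_cases hsw : PySem.Str.startswith (PySem.Str.strip p) (key ++ " \"") = true
        · rw [if_pos hsw]
          obtain ⟨t', ht⟩ := (pvStartswith_app _ key).mp hsw
          have hpart : (PySem.Str.strip p).toList = key.toList ++ ' ' :: '"' :: t' := by
            rw [← ht]; simp
          have hpv : pvPart [' ', '"'] (PySem.Str.strip p).toList = some (key.toList, t') := by
            rw [hpart]; exact pvPart_at _ _ hq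
          have hin : PySem.Str.isIn " \"" (PySem.Str.strip p) = true :=
            (pvIsInQuote _).mpr (by rw [hpv]; simp)
          rw [if_pos hin, pvBPieces, hpv]
          simp only [List.getD_cons_zero, List.getD_cons_succ, String.ofList_toList]
          have hqmem : '"' ∈ (PySem.Str.strip p).toList := by rw [hpart]; simp
          have hdw : (PySem.Str.strip p).toList.dropWhile (· ≠ '"') = '"' :: t' := by
            rw [hpart, show key.toList ++ ' ' :: '"' :: t' = (key.toList ++ [' ']) ++ '"' :: t' by simp]
            rw [List.dropWhile_append]
            have h1 : (key.toList ++ [' ']).dropWhile (· ≠ '"') = [] := by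
              rw [List.dropWhile_eq_nil_iff]
              intro x hx
              have hxq : x ≠ '"' := by
                rcases List.mem_append.mp hx with h | h
                · exact fun he => hq (he ▸ h)
                · simp at h; subst h; decide
              simpa using hxq
            rw [h1]
            simp
          rw [pvPersist key _ rest _ (by rw [PySem.Dict.get?_setdefault_self, htab])]
          rw [pvASplit_val _ hqmem, hdw, pvBVal]
          simp [String.toList_ofList]
        · rw [if_neg hsw]
          by_cases hin : PySem.Str.isIn " \"" (PySem.Str.strip p) = true
          · rw [if_pos hin]
            cases hpv : pvPart [' ', '"'] (PySem.Str.strip p).toList with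
            | none => exact absurd hpv ((pvIsInQuote _).mp hin)
            | some ab =>
              rw [pvBPieces, hpv]
              simp only [List.getD_cons_zero, List.getD_cons_succ]
              have hne : String.ofList ab.1 ≠ key := by
                intro he
                apply hsw
                apply (pvStartswith_app _ _).mpr
                have hd := pvPart_decomp [' ', '"'] _ ab.1 ab.2 (by rw [hpv])
                have hab : ab.1 = key.toList := by
                  rw [← he, String.toList_ofList]
                refine ⟨ab.2, ?_⟩
                rw [hd, hab]
              have htab' : ((table.setdefault (String.ofList ab.1)
                  (((PySem.Str.splitMax? (String.ofList ab.2) "\"" 1).getD []).getD 0 "")).get? key) = none := by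
                rw [PySem.Dict.get?_setdefault_of_ne _ _ (Ne.symm hne)]; exact htab
              rw [ih _, htab']
              simp
          · rw [if_neg hin, ih _, htab]
            simp

theorem pvEmpty_get (key : String) : (PySem.Dict.empty : PySem.Dict String String).get? key = none := rfl

-- ===== VERDICT (by name: the statement is the Claim_ definition above) =====
theorem parse_gff_attr_py_spec : Claim_equal_parse_gff_attr_py := by
  intro attrs key _ hpre
  unfold Spec_parse_gff_attr_py parse_gff_attr_py parse_gff_attr_py_alt
  rw [pvINV key hpre _ _, pvEmpty_get, Option.none_or]
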